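-- pv_equiv track=rewrite | github.com/Chen-Yihua/anchor-automata-explainer | datasets/tomita_loader_dfa.py | check
-- ===== SOURCE A (Python) =====
-- def check(lst):
--     s = lst
--     if len(s)%3 != 0:
--         return False
--     for i in range(0, len(s), 3):
--         if not all(x==s[i] for x in s[i:i+3]):
--             return False
--     return True
-- ===== SOURCE B (Python) =====
-- def check(lst):
--     run = 0
--     prev = None
--     for x in lst:
--         if run and x != prev:
--             if run % 3:
--                 return False
--             run = 0
--         prev = x
--         run += 1
--     return run % 3 == 0
-- ===== Notes on version B (the rewrite author's own statement) =====
-- stated objective: alternative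
-- what changed: Replaced the mod-3 length guard plus group-by-3 indexed loop by a run-length scan: one pass counting maximal runs of consecutive equal elements and requiring every run length (including the final one) to be divisible by 3; the total length check disappears because it is the sum of the run lengths.
import Mathlib
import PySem

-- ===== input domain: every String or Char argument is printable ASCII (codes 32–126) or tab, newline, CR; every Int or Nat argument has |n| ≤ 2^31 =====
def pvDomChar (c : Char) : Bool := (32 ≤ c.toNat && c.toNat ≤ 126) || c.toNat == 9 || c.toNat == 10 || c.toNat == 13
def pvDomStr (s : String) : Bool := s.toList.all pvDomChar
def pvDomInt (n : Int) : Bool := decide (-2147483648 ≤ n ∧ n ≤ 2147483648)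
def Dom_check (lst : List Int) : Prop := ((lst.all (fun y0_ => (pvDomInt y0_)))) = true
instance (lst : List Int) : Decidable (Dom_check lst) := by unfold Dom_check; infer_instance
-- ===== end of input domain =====

-- B replaces A's mod-3 length guard + group-by-3 indexed loop by a run-length scan:
-- every maximal run of consecutive equal elements must have length divisible by 3
-- (objective: alternative algorithm, same cost).

-- ===== PORT A =====
-- 'for i in range(0, len(s), 3): if not all(x==s[i] for x in s[i:i+3]): return False'
-- ported as structural recursion over the precomputed index list (early return = false).
-- s[i] is ported as pyGetD s i 0: every i produced by the range is a valid index, so the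
-- default is never used; s[i:i+3] is PySem.List.slice.
def checkLoop (s : List Int) : List Int → Bool
  | [] => true
  | i :: rest =>
    if !((PySem.List.slice s (some i) (some (i + 3))).all
          (fun x => x == PySem.List.pyGetD s i 0)) then false
    else checkLoop s rest

-- len(s) % 3: length is nonnegative and 3 > 0, so Lean's Int.emod agrees with Python's %.
def check (lst : List Int) : Bool :=
  if (lst.length : Int) % 3 ≠ 0 then false
  else checkLoop lst (PySem.List.pyRange 0 lst.length 3)

-- ===== PORT B =====
-- the for loop of Source B: state (run, prev); 'if run and x != prev' resets at a run
-- boundary, returning False when the finished run's length is not divisible by 3;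
-- prev starts as None, ported as Option Int (int != None is True in Python).
def checkAltGo : List Int → Int → Option Int → Bool
  | [], run, _ => run % 3 == 0
  | x :: rest, run, prev =>
    if run ≠ 0 ∧ some x ≠ prev then
      if run % 3 ≠ 0 then false
      else checkAltGo rest 1 (some x)      -- run reset to 0, then prev = x; run += 1
    else checkAltGo rest (run + 1) (some x)

def check_alt (lst : List Int) : Bool := checkAltGo lst 0 none

-- ===== PRECONDITION & SPEC =====
def Spec_check (lst : List Int) (out : Bool) : Prop := out = check_alt lst
instance (lst : List Int) (out : Bool) : Decidable (Spec_check lst out) := by unfold Spec_check; infer_instance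

-- ===== CLAIM (what is proved, stated in full; the proofs are below) =====
def Claim_equal_check : Prop := ∀ (lst : List Int), Dom_check lst → Spec_check lst (check lst)

-- ===== LEMMAS AND PROOFS =====

-- canonical form: the list is a sequence of internally-equal triples
def spec3 : List Int → Bool
  | [] => true
  | a :: b :: c :: rest => a == b && b == c && spec3 rest
  | _ => false

theorem spec3_not_dvd {lst : List Int} (h : ¬ (3 ∣ lst.length)) : spec3 lst = false := by
  induction lst using spec3.induct with
  | case1 => simp at h
  | case2 a b c rest ih =>
    by_cases hr : 3 ∣ rest.length
    · exact absurd (by simp; omega) h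
    · simp [spec3, ih hr]
  | case3 l h1 h2 => cases l with
    | nil => simp at h1
    | cons a t => cases t with
      | nil => simp [spec3]
      | cons b u => cases u with
        | nil => simp [spec3]
        | cons c v => exact absurd rfl (h2 a b c v)

theorem drop3 (lst : List Int) (i : Nat) (h : i + 2 < lst.length) :
    lst.drop i = lst[i] :: lst[i+1] :: lst[i+2] :: lst.drop (i+3) := by
  rw [List.drop_eq_getElem_cons (by omega), List.drop_eq_getElem_cons (by omega),
      List.drop_eq_getElem_cons (by omega)]

theorem pyRange3_cons (a b : Int) (h : a < b) :
    PySem.List.pyRange a b 3 = a :: PySem.List.pyRange (a + 3) b 3 := by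
  rw [PySem.List.pyRange_of_pos a b (by norm_num),
      PySem.List.pyRange_of_pos (a+3) b (by norm_num)]
  by_cases h3 : a + 3 < b
  · rw [if_pos h, if_pos h3]
    have hc : ((b - a + 3 - 1) / 3).toNat = ((b - (a+3) + 3 - 1) / 3).toNat + 1 := by omega
    rw [hc, List.range_succ_eq_map, List.map_cons, List.map_map]
    simp only [Nat.cast_zero, mul_zero, add_zero]
    congr 1
    apply List.map_congr_left
    intro k _
    simp [Function.comp, Nat.succ_eq_add_one]
    ring
  · rw [if_pos h, if_neg h3]
    have hc : ((b - a + 3 - 1) / 3).toNat = 1 := by omega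
    simp [hc, List.range_succ]

theorem checkLoop_eq_spec3 (lst : List Int) (i : Nat) (h : i ≤ lst.length)
    (h3 : 3 ∣ (lst.length - i)) :
    checkLoop lst (PySem.List.pyRange i lst.length 3) = spec3 (lst.drop i) := by
  have key : ∀ k i, lst.length - i = k → i ≤ lst.length → 3 ∣ (lst.length - i) →
      checkLoop lst (PySem.List.pyRange i lst.length 3) = spec3 (lst.drop i) := by
    intro k
    induction k using Nat.strong_induction_on with
    | _ k ih =>
      intro i hk hi hd
      by_cases hlt : i < lst.length
      · have hge : i + 2 < lst.length := by omega
        rw [pyRange3_cons _ _ (by exact_mod_cast hlt)]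
        simp only [checkLoop]
        have hsl : PySem.List.slice lst (some (i : Int)) (some ((i : Int) + 3)) =
            (lst.drop i).take 3 := by
          rw [show ((i : Int) + 3) = ((i : Int) + ((3:Nat) : Int)) by norm_num,
              PySem.List.slice_natCast_add]
        have e0 : PySem.List.pyGetD lst (i : Int) 0 = lst[i]'(by omega) := by
          rw [PySem.List.pyGetD_natCast]; exact List.getD_eq_getElem _ _ (by omega)
        rw [hsl, drop3 lst i hge, e0]
        simp only [List.take_succ_cons, List.take_zero, List.all_cons, List.all_nil]
        by_cases hab : lst[i] = lst[i+1] <;> by_cases hbc : lst[i+1] = lst[i+2]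
        · rw [if_neg (by simp [hab, hbc])]
          rw [show ((i : Int) + 3) = (((i+3 : Nat)) : Int) by push_cast; ring]
          rw [ih (lst.length - (i+3)) (by omega) (i+3) rfl (by omega) (by omega)]
          simp [spec3, hab, hbc]
        · rw [if_pos (by simp [hab]; exact fun hcon => hbc hcon.symm)]; simp [spec3, hbc]
        · rw [if_pos (by simp; exact Or.inl (fun hcon => hab hcon.symm))]; simp [spec3, hab]
        · rw [if_pos (by simp; exact Or.inl (fun hcon => hab hcon.symm))]; simp [spec3, hab]
      · have hnil : PySem.List.pyRange (i : Int) (lst.length : Int) 3 = [] := by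
          rw [PySem.List.pyRange_of_pos _ _ (by norm_num), if_neg (by exact_mod_cast by omega)]
          simp
        rw [hnil, List.drop_eq_nil_of_le (by omega)]
        simp [checkLoop, spec3]
  exact key (lst.length - i) i rfl h h3

-- spec3 swallows a leading run whose length is a multiple of 3
theorem spec3_replicate_append (k : Nat) (v : Int) (l : List Int) :
    spec3 (List.replicate (3 * k) v ++ l) = spec3 l := by
  induction k generalizing l with
  | zero => simp
  | succ n ih =>
    have h3 : 3 * (n + 1) = (3 * n) + 3 := by ring
    rw [h3, List.replicate_add, List.append_assoc, ih (List.replicate 3 v ++ l)]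
    simp [List.replicate, spec3]

-- spec3 is false when the leading run ends at a non-multiple of 3
theorem spec3_bad_run (r : Nat) (v x : Int) (l : List Int)
    (hr : ¬ 3 ∣ r) (hx : x ≠ v) : spec3 (List.replicate r v ++ x :: l) = false := by
  have key : ∀ k r, r = k → ¬ 3 ∣ r → spec3 (List.replicate r v ++ x :: l) = false := by
    intro k
    induction k using Nat.strong_induction_on with
    | _ k ih =>
      intro r hk hr
      match r, hk with
      | 0, _ => exact absurd ⟨0, rfl⟩ hr
      | 1, hk =>
        cases l with
        | nil => simp [spec3]
        | cons c t => simp [spec3]; intro h; exact absurd h.symm hx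
      | 2, hk =>
        simp [List.replicate, spec3]
        intro h; exact absurd h.symm hx
      | (m+3), hk =>
        have : List.replicate (m+3) v = v :: v :: v :: List.replicate m v := by
          simp [List.replicate]
        rw [this]
        simp only [List.cons_append, spec3]
        rw [ih m (by omega) m rfl (by omega)]
        simp
  exact key r r rfl hr

-- the loop invariant: a positive current run of r copies of v plus the rest
theorem altGo_eq_spec3 (rest : List Int) (r : Nat) (v : Int) (hr : 0 < r) :
    checkAltGo rest (r : Int) (some v) = spec3 (List.replicate r v ++ rest) := by
  induction rest generalizing r v with
  | nil =>
    simp only [checkAltGo, List.append_nil]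
    by_cases hd : 3 ∣ r
    · obtain ⟨k, hk⟩ := hd
      subst hk
      rw [show List.replicate (3*k) v = List.replicate (3*k) v ++ [] by simp,
          spec3_replicate_append k v []]
      simp [spec3]
    · rw [spec3_not_dvd (by simpa using hd)]
      simp; omega
  | cons x t ih =>
    simp only [checkAltGo]
    by_cases hxv : x = v
    · subst hxv
      rw [if_neg (by simp)]
      have : ((r : Int) + 1) = ((r + 1 : Nat) : Int) := by push_cast; ring
      rw [this, ih (r+1) x (by omega)]
      congr 1
      rw [show r + 1 = r + 1 from rfl, List.replicate_add]
      simp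
    · rw [if_pos ⟨by omega, fun h => hxv (Option.some.inj h)⟩]
      by_cases hd : 3 ∣ r
      · obtain ⟨k, hk⟩ := hd
        rw [if_neg (by omega)]
        rw [show (1 : Int) = ((1 : Nat) : Int) from rfl, ih 1 x (by omega)]
        subst hk
        rw [spec3_replicate_append k v (x :: t)]
        simp
      · rw [if_pos (by omega)]
        rw [spec3_bad_run r v x t hd hxv]

-- ===== VERDICT (by name: the statement is the Claim_ definition above) =====
theorem check_spec : Claim_equal_check := by
  intro lst _
  unfold Spec_check check check_alt
  cases lst with
  | nil => simp [checkLoop, checkAltGo, PySem.List.pyRange]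
  | cons x t =>
    have hb : checkAltGo (x :: t) 0 none = checkAltGo t 1 (some x) := by
      simp [checkAltGo]
    rw [hb, show (1 : Int) = ((1 : Nat) : Int) from rfl,
        altGo_eq_spec3 t 1 x (by omega)]
    have hx : List.replicate 1 x ++ t = x :: t := by simp
    rw [hx]
    by_cases hd : (3 : Nat) ∣ (x :: t).length
    · have hm : ¬ (((x :: t).length : Int) % 3 ≠ 0) := by
        obtain ⟨k, hk⟩ := hd; omega
      rw [if_neg hm]
      have := checkLoop_eq_spec3 (x :: t) 0 (Nat.zero_le _) (by simpa using hd)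
      simpa using this
    · have hm : (((x :: t).length : Int) % 3 ≠ 0) := by
        intro hc; exact hd (by omega)
      rw [if_pos hm, spec3_not_dvd hd]
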